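-- pv_equiv track=rewrite | github.com/ahmaddroobi99/RelationalAI_DSA_Interview | T1.py | solution
-- ===== SOURCE A (Python) =====
-- def solution(S):
--     ha ={}
--     count=0
--     for i in S:
--         if i in ha :
--             ha[i]+=1
--         else :
--             ha[i]=1
--
--     for i in ha.values():
--         if i %2 ==1 :
--             count+=1
--     return count
--
--     return ha
-- ===== SOURCE B (Python) =====
-- def solution(S):
--     # One pass with a parity set: x is in `seen` iff seen an odd number of times.
--     seen = set()
--     for x in S:
--         if x in seen:
--             seen.discard(x)
--         else:
--             seen.add(x)
--     return len(seen)
-- ===== Notes on version B (the rewrite author's own statement) =====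
-- stated objective: simpler
-- what changed: Replaces the frequency dictionary plus a second pass over its values by a single pass maintaining a parity set (element present iff seen an odd number of times); the answer is the set's size.
import Mathlib
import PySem

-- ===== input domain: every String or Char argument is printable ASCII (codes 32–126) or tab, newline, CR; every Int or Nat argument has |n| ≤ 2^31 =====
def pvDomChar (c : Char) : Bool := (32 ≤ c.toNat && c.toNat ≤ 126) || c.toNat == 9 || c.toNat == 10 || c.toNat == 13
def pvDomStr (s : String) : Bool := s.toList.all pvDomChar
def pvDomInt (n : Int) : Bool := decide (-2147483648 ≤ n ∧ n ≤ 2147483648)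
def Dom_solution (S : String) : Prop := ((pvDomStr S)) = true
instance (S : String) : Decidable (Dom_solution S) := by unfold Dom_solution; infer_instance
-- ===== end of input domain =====

-- B replaces A's frequency dictionary + second pass over its values by one pass with a parity set (simpler, same O(n) cost).

-- ===== PORT A =====
def solution (S : String) : Int :=
  let ha := S.toList.foldl
    (fun d i => if d.contains i then d.insert i (d.getD i 0 + 1) else d.insert i (1 : Int))
    PySem.Dict.empty
  ha.values.foldl (fun count i => if PySem.Int.mod i 2 == 1 then count + 1 else count) (0 : Int)

-- ===== PORT B =====
def solution_alt (S : String) : Int :=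
  let seen := S.toList.foldl
    (fun s x => if PySem.Set.contains s x then PySem.Set.discard s x else PySem.Set.add s x)
    PySem.Set.empty
  PySem.Set.len seen

-- ===== PRECONDITION & SPEC =====
def Spec_solution (S : String) (out : Int) : Prop := out = solution_alt S
instance (S : String) (out : Int) : Decidable (Spec_solution S out) := by unfold Spec_solution; infer_instance

-- ===== CLAIM (what is proved, stated in full; the proofs are below) =====
def Claim_equal_solution : Prop := ∀ (S : String), Dom_solution S → Spec_solution S (solution S)

-- ===== LEMMAS AND PROOFS =====

-- the odd-count predicate on Int values
def pvOdd (v : Int) : Bool := PySem.Int.mod v 2 == 1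

theorem pvOdd_natCast (n : Nat) : pvOdd (n : Int) = decide (n % 2 = 1) := by
  rw [pvOdd, PySem.Int.mod_eq_emod_of_pos (by norm_num : (0:Int) < 2), Bool.eq_iff_iff]
  simp only [beq_iff_eq, decide_eq_true_eq]
  omega

-- A's counting loop is PySem.Dict.counter
theorem pvA_fold_eq_counter (l : List Char) :
    l.foldl (fun d i => if d.contains i then d.insert i (d.getD i 0 + 1) else d.insert i (1 : Int))
      PySem.Dict.empty = PySem.Dict.counter l := by
  have hf : (fun (d : PySem.Dict Char Int) i =>
      if d.contains i then d.insert i (d.getD i 0 + 1) else d.insert i (1 : Int)) =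
      (fun d i => d.insert i (d.getD i 0 + 1)) := by
    funext d i
    by_cases h : d.contains i = true
    · simp [h]
    · rw [if_neg h, PySem.Dict.getD_of_not_contains d 0 (by simpa using h)]
      norm_num
  rw [hf, PySem.Dict.foldl_insert_getD_add_one_eq_counter]

-- A's second loop counts the odd values
theorem pvCountLoop (vs : List Int) (a : Int) :
    vs.foldl (fun count i => if PySem.Int.mod i 2 == 1 then count + 1 else count) a =
      a + (vs.countP pvOdd : Int) := by
  induction vs generalizing a with
  | nil => simp
  | cons v vs ih =>
      rw [List.foldl_cons, List.countP_cons]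
      by_cases h : (PySem.Int.mod v 2 == 1) = true
      · rw [if_pos h, ih]
        simp only [pvOdd, h, if_pos]
        push_cast; ring
      · rw [if_neg h, ih]
        have hf : pvOdd v = false := by simpa [pvOdd] using h
        simp [hf]

-- B's toggle loop: parity-set invariant
theorem pvToggle_invariant (l : List Char) (s : PySem.Set Char) (hs : s.Nodup) :
    (l.foldl (fun s x => if PySem.Set.contains s x then PySem.Set.discard s x else PySem.Set.add s x) s).Nodup ∧
    ∀ c, c ∈ l.foldl (fun s x => if PySem.Set.contains s x then PySem.Set.discard s x else PySem.Set.add s x) s ↔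
      ((c ∈ s) ↔ ¬ (l.count c % 2 = 1)) := by
  induction l generalizing s with
  | nil => simp [hs]
  | cons x l ih =>
      simp only [List.foldl_cons]
      by_cases hx : PySem.Set.contains s x = true
      · rw [if_pos hx]
        have hmem : x ∈ s := (PySem.Set.contains_iff s x).mp hx
        obtain ⟨hn, hm⟩ := ih (PySem.Set.discard s x) (PySem.Set.nodup_discard s x hs)
        refine ⟨hn, fun c => ?_⟩
        rw [hm c, PySem.Set.mem_discard]
        by_cases hcx : c = x
        · subst hcx
          simp [hmem, List.count_cons_self]
          omega
        · have hc : (x :: l).count c = l.count c := by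
            simp [Ne.symm hcx]
          rw [hc]
          simp [hcx]
      · rw [if_neg hx]
        have hmem : x ∉ s := fun h => hx ((PySem.Set.contains_iff s x).mpr h)
        obtain ⟨hn, hm⟩ := ih (PySem.Set.add s x) (PySem.Set.nodup_add s x hs)
        refine ⟨hn, fun c => ?_⟩
        rw [hm c, PySem.Set.mem_add]
        by_cases hcx : c = x
        · subst hcx
          simp [hmem, List.count_cons_self]
          omega
        · have hc : (x :: l).count c = l.count c := by
            simp [Ne.symm hcx]
          rw [hc]
          simp [hcx]

-- ===== VERDICT (by name: the statement is the Claim_ definition above) =====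
theorem solution_spec : Claim_equal_solution := by
  intro S _
  unfold Spec_solution solution solution_alt
  set l := S.toList with hl
  rw [pvA_fold_eq_counter, pvCountLoop]
  simp only [zero_add]
  -- A's value: countP pvOdd over the counter's values
  have hvals : (PySem.Dict.counter l).values =
      (PySem.Set.ofList l).map (fun k => (l.count k : Int)) := by
    have := PySem.Dict.items_counter (xs := l)
    simp only [PySem.Dict.values, this, List.map_map]
    rfl
  rw [hvals, List.countP_map]
  simp only [Function.comp_def]
  -- B's value
  obtain ⟨hn, hm⟩ := pvToggle_invariant l PySem.Set.empty (by simp [PySem.Set.empty])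
  set r := l.foldl (fun s x => if PySem.Set.contains s x then PySem.Set.discard s x else PySem.Set.add s x) PySem.Set.empty with hr
  -- r is a Nodup list whose members are exactly the odd-count chars; compare with the filter of ofList l
  have hperm : r.Perm ((PySem.Set.ofList l).filter (fun c => decide (l.count c % 2 = 1))) := by
    rw [List.perm_ext_iff_of_nodup hn (List.Nodup.filter _ (PySem.Set.nodup_ofList l))]
    intro c
    rw [hm c]
    simp only [List.mem_filter, PySem.Set.mem_ofList, PySem.Set.empty, List.not_mem_nil,
      false_iff, decide_eq_true_eq]
    constructor
    · intro h
      have hodd : l.count c % 2 = 1 := by tauto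
      exact ⟨List.count_pos_iff.mp (by omega), hodd⟩
    · tauto
  have hlen : r.length = ((PySem.Set.ofList l).filter (fun c => decide (l.count c % 2 = 1))).length :=
    hperm.length_eq
  have hcount : ((PySem.Set.ofList l).countP (fun a => pvOdd ((l.count a : Int)))) =
      ((PySem.Set.ofList l).filter (fun c => decide (l.count c % 2 = 1))).length := by
    rw [← List.countP_eq_length_filter]
    exact List.countP_congr (fun c _ => by rw [pvOdd_natCast])
  simp only [PySem.Set.len, hlen, hcount]
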